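-- pv_equiv track=rewrite | github.com/Lingersky/Maze | maze.py | __space_vert_back
-- ===== SOURCE A (Python) =====
-- def __space_vert_back(matrix):
--     line = 0
--     while line < len(matrix):
--         character = 0
--         while character < len(matrix[line]):
--             if matrix[line][character] > 1:
--                 matrix[line][character] = 1
--             if line == 0 or line == len(matrix) - 1:
--                 matrix[line][character] = None
--             if character == 0 or character == len(matrix[line]) - 1:
--                 matrix[line][character] = None
--             character += 1
--         line += 1
--
--     return matrix
-- ===== SOURCE B (Python) =====
-- def __space_vert_back(matrix):
--     # Cap every cell at 1 in one comprehension, then rebuild the grid by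
--     # destructuring it into head, *mid, tail: the outer rows are blanked
--     # whole, each middle row is its interior slice framed by two Nones.
--     def cap(x):
--         return 1 if x > 1 else x
--     rows = [[cap(x) for x in row] for row in matrix]
--     if len(rows) <= 1:
--         out = [[None] * len(r) for r in rows]
--     else:
--         head, *mid, tail = rows
--         out = ([[None] * len(head)]
--                + [[None] + r[1:-1] + [None] if len(r) > 1 else [None] * len(r)
--                   for r in mid]
--                + [[None] * len(tail)])
--     matrix[:] = out
--     return matrix
-- ===== Notes on version B (the rewrite author's own statement) =====
-- stated objective: alternative
-- what changed: Instead of A's per-cell nested index-walk with three conditionals per cell, B rebuilds each row from slices: first/last/length<=1 rows become [None]*len, every other row becomes [None] + capped row[1:-1] + [None], so border cells are never inspected or compared.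
import Mathlib
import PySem

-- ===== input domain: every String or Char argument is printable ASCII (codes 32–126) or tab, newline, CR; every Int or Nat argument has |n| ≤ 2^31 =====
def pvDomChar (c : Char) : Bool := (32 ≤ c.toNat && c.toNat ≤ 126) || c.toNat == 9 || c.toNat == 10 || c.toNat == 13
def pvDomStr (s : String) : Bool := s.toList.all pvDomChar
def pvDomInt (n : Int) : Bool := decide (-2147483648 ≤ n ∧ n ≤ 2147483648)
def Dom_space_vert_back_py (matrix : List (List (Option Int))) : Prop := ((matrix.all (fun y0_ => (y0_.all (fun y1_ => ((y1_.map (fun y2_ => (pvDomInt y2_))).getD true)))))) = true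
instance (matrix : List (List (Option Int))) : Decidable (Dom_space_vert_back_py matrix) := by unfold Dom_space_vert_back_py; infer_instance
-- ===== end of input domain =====

-- B caps the whole grid in one comprehension and then rebuilds it by head/*mid/tail
-- destructuring (outer rows blanked whole, middle rows = interior slice framed by Nones)
-- instead of A's per-cell index tests; objective: alternative. A mutates `matrix` per
-- cell, B reassigns matrix[:]; the equivalence proved here is about the return value.

-- ===== PORT A =====
-- One cell of A's inner-loop body: the three `if`s in A's order.  A Python `None`
-- cell makes `matrix[line][character] > 1` raise TypeError (excluded by Pre_);
-- the port leaves such a cell as-is at that step.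
def pvCellA (c : Option Int) (line character numLines rowLen : Nat) : Option Int :=
  let c := match c with
    | some v => if v > 1 then some 1 else some v
    | none => none
  let c := if line = 0 ∨ line = numLines - 1 then none else c
  if character = 0 ∨ character = rowLen - 1 then none else c

-- inner `while character < len(matrix[line])`; the row length never changes, so it
-- is passed once as rowLen.
def pvInnerA (cells : List (Option Int)) (character : Nat) (line numLines rowLen : Nat) :
    List (Option Int) :=
  match cells with
  | [] => []
  | c :: rest => pvCellA c line character numLines rowLen :: pvInnerA rest (character + 1) line numLines rowLen

-- outer `while line < len(matrix)`
def pvOuterA (rows : List (List (Option Int))) (line numLines : Nat) : List (List (Option Int)) :=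
  match rows with
  | [] => []
  | r :: rs => pvInnerA r 0 line numLines r.length :: pvOuterA rs (line + 1) numLines

def space_vert_back_py (matrix : List (List (Option Int))) : List (List (Option Int)) :=
  pvOuterA matrix 0 matrix.length

-- ===== PORT B =====
-- `cap(x)` applied through the Option (Python would raise on None; Pre_ excludes that)
def pvCapB (c : Option Int) : Option Int := c.map (fun v => if v > 1 then 1 else v)

-- `[None] + r[1:-1] + [None] if len(r) > 1 else [None] * len(r)` for a middle row
def pvMidRowB (r : List (Option Int)) : List (Option Int) :=
  if 1 < r.length then none :: PySem.List.slice r (some 1) (some (-1)) ++ [none]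
  else List.replicate r.length (none : Option Int)

def space_vert_back_py_alt (matrix : List (List (Option Int))) : List (List (Option Int)) :=
  let rows := matrix.map (fun row => row.map pvCapB)
  match rows with
  | [] => []                                                -- len(rows) <= 1
  | [r] => [List.replicate r.length (none : Option Int)]
  | head :: s :: rest =>                                    -- head, *mid, tail = rows
      List.replicate head.length (none : Option Int)
        :: ((s :: rest).dropLast.map pvMidRowB
            ++ [List.replicate ((s :: rest).getLast (by simp)).length (none : Option Int)])

-- ===== PRECONDITION & SPEC =====
-- Pre_ excludes matrices containing a None cell: there Python A raises TypeError
-- on `matrix[line][character] > 1` (and B raises likewise in `cap`).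
def Pre_space_vert_back_py (matrix : List (List (Option Int))) : Prop :=
  (matrix.all (fun row => row.all (fun c => c.isSome))) = true
instance (matrix : List (List (Option Int))) : Decidable (Pre_space_vert_back_py matrix) := by
  unfold Pre_space_vert_back_py; infer_instance

def pvWitness_space_vert_back_py : List (List (Option Int)) :=
  [[some 2, some 0, some 3], [some 5, some 1, some 9], [some 0, some 7, some 2]]

def Spec_space_vert_back_py (matrix : List (List (Option Int))) (out : List (List (Option Int))) : Prop := out = space_vert_back_py_alt matrix
instance (matrix : List (List (Option Int))) (out : List (List (Option Int))) : Decidable (Spec_space_vert_back_py matrix out) := by unfold Spec_space_vert_back_py; infer_instance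

-- ===== CLAIM (what is proved, stated in full; the proofs are below) =====
def Claim_equal_space_vert_back_py : Prop := ∀ (matrix : List (List (Option Int))), Dom_space_vert_back_py matrix → Pre_space_vert_back_py matrix → Spec_space_vert_back_py matrix (space_vert_back_py matrix)

-- ===== LEMMAS AND PROOFS =====

-- on a border line every cell becomes none
theorem pvInnerA_border (cells : List (Option Int)) (character line numLines rowLen : Nat)
    (h : line = 0 ∨ line = numLines - 1) :
    pvInnerA cells character line numLines rowLen = List.replicate cells.length none := by
  induction cells generalizing character with
  | nil => rfl
  | cons c rest ih =>
    simp [pvInnerA, pvCellA, h, ih, List.replicate_succ]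

-- interior line, tail of a row: everything is capped except the last cell
theorem pvInnerA_interior_tail (cells : List (Option Int)) (character line numLines rowLen : Nat)
    (hline : ¬ (line = 0 ∨ line = numLines - 1)) (hne : cells ≠ [])
    (hchar : 1 ≤ character) (hlen : character + cells.length = rowLen) :
    pvInnerA cells character line numLines rowLen
      = (cells.map pvCapB).dropLast ++ [none] := by
  induction cells generalizing character with
  | nil => exact absurd rfl hne
  | cons c rest ih =>
    simp only [List.length_cons] at hlen
    cases rest with
    | nil =>
      have hc : character = rowLen - 1 := by simp at hlen; omega
      simp [pvInnerA, pvCellA, hc]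
    | cons d rest' =>
      have h0 : character ≠ 0 := by omega
      have h1 : character ≠ rowLen - 1 := by simp only [List.length_cons] at hlen; omega
      rw [show pvInnerA (c :: d :: rest') character line numLines rowLen
            = pvCellA c line character numLines rowLen
              :: pvInnerA (d :: rest') (character + 1) line numLines rowLen from rfl]
      rw [ih (character + 1) (by simp) (by omega) (by simp only [List.length_cons] at *; omega)]
      cases c <;> simp [pvCellA, pvCapB, hline, h0, h1] <;> split <;> rfl

-- Python's r[1:-1] on a list of length ≥ 2
theorem pvSlice_one_neg_one (c d : Option Int) (rest : List (Option Int)) :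
    PySem.List.slice (c :: d :: rest) (some 1) (some (-1)) = (d :: rest).dropLast := by
  simp [PySem.List.slice, PySem.List.clampIdx, List.dropLast_eq_take]
  split <;> omega

-- on an interior line A's inner loop produces B's framed middle row of the capped row
theorem pvRow_interior (row : List (Option Int)) (line numLines : Nat)
    (hline : ¬ (line = 0 ∨ line = numLines - 1)) :
    pvInnerA row 0 line numLines row.length = pvMidRowB (row.map pvCapB) := by
  match row with
  | [] => simp [pvInnerA, pvMidRowB]
  | [c] => simp [pvInnerA, pvCellA, pvMidRowB]
  | c :: d :: rest =>
    have htail := pvInnerA_interior_tail (d :: rest) 1 line numLines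
      (c :: d :: rest).length hline (by simp) (by omega) (by simp only [List.length_cons]; omega)
    rw [show pvInnerA (c :: d :: rest) 0 line numLines (c :: d :: rest).length
          = pvCellA c line 0 numLines (c :: d :: rest).length
            :: pvInnerA (d :: rest) 1 line numLines (c :: d :: rest).length from rfl]
    rw [htail]
    simp only [List.map_cons, pvMidRowB, List.length_cons]
    rw [if_pos (by omega), pvSlice_one_neg_one]
    simp [pvCellA]

-- A's outer loop from line 1 to the end equals B's mid/tail rebuild
theorem pvTail_eq (rows : List (List (Option Int))) (line numLines : Nat)
    (hne : rows ≠ []) (h1 : 1 ≤ line) (h2 : line + rows.length = numLines) :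
    pvOuterA rows line numLines
      = (rows.map (fun row => List.map pvCapB row)).dropLast.map pvMidRowB
        ++ [List.replicate ((rows.map (fun row => List.map pvCapB row)).getLast
              (by simpa using hne)).length (none : Option Int)] := by
  induction rows generalizing line with
  | nil => exact absurd rfl hne
  | cons r rest ih =>
    cases rest with
    | nil =>
      have hl : line = numLines - 1 := by simp at h2; omega
      simp [pvOuterA, pvInnerA_border _ _ _ _ _ (Or.inr hl)]
    | cons s rest' =>
      have hint : ¬ (line = 0 ∨ line = numLines - 1) := by
        simp only [List.length_cons] at h2; omega
      rw [show pvOuterA (r :: s :: rest') line numLines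
            = pvInnerA r 0 line numLines r.length :: pvOuterA (s :: rest') (line + 1) numLines
          from rfl]
      rw [pvRow_interior r line numLines hint,
          ih (line + 1) (by simp) (by omega) (by simp only [List.length_cons] at *; omega)]
      simp [List.getLast_cons]

-- ===== VERDICT (by name: the statement is the Claim_ definition above) =====
theorem space_vert_back_py_spec : Claim_equal_space_vert_back_py := by
  intro matrix _ _
  unfold Spec_space_vert_back_py space_vert_back_py space_vert_back_py_alt
  match matrix with
  | [] => rfl
  | [r] =>
    simp [pvOuterA, pvInnerA_border _ _ _ _ _ (Or.inl rfl)]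
  | r :: s :: rest =>
    rw [show pvOuterA (r :: s :: rest) 0 (r :: s :: rest).length
          = pvInnerA r 0 0 (r :: s :: rest).length r.length
            :: pvOuterA (s :: rest) 1 (r :: s :: rest).length from rfl]
    rw [pvInnerA_border _ _ _ _ _ (Or.inl rfl),
        pvTail_eq (s :: rest) 1 (r :: s :: rest).length (by simp) (by omega)
          (by simp only [List.length_cons]; omega)]
    simp
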